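-- pv_equiv track=rewrite | github.com/btharper/aoc | 2020/d20/d20.bak.py | _line_to_ints
-- ===== SOURCE A (Python) =====
-- def _line_to_ints(line):
--     line = list(line)
--     ret = 0
--     rev = 0
--     for i, char in enumerate(reversed(line)):
--         if char == '#':
--             ret += 2**i
--     for i, char in enumerate(line):
--         if char == '#':
--             rev += 2**i
--     return ret, rev
-- ===== SOURCE B (Python) =====
-- def _line_to_ints(line):
--     ret = 0
--     rev = 0
--     pw = 1
--     for ch in line:
--         b = 1 if ch == '#' else 0
--         ret = ret * 2 + b
--         rev += b * pw
--         pw *= 2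
--     return ret, rev
-- ===== Notes on version B (the rewrite author's own statement) =====
-- stated objective: alternative
-- what changed: Replaces A's two enumerate loops (one over the reversed list, one forward, each adding 2**i) by a single forward pass that builds the MSB-first value by Horner's rule (ret = ret*2 + bit) and the LSB-first value with a running power-of-two accumulator.
import Mathlib
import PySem

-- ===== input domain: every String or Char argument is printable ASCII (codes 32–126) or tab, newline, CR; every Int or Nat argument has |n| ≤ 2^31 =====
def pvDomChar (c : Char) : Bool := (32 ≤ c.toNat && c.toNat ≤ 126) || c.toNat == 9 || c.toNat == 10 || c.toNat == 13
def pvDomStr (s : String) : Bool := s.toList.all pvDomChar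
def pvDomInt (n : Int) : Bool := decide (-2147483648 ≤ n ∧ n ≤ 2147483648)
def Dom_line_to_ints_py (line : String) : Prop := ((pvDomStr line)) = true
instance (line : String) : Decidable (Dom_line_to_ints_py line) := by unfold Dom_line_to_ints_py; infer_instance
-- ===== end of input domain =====

-- B replaces A's two enumerate loops (reversed and forward, each adding 2**i) by one
-- forward pass: Horner's rule for the MSB-first value, a running power for the other.

-- ===== PORT A =====
-- A: two passes with explicit bit weights 2**i, first over reversed(line), then forward.
def line_to_ints_py (line : String) : Int × Int :=
  let l := line.toList
  let ret : Int := (PySem.List.enumerate l.reverse).foldl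
    (fun r p => if p.2 = '#' then r + 2 ^ p.1.toNat else r) 0
  let rev : Int := (PySem.List.enumerate l).foldl
    (fun r p => if p.2 = '#' then r + 2 ^ p.1.toNat else r) 0
  (ret, rev)

-- ===== PORT B =====
-- B: a single forward pass over the characters carrying (ret, rev, pw).
def line_to_ints_py_alt (line : String) : Int × Int :=
  let f := line.toList.foldl
    (fun (s : Int × Int × Int) ch =>
      let b : Int := if ch = '#' then 1 else 0
      (s.1 * 2 + b, s.2.1 + b * s.2.2, s.2.2 * 2))
    (0, 0, 1)
  (f.1, f.2.1)

-- ===== PRECONDITION & SPEC =====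
def Spec_line_to_ints_py (line : String) (out : Int × Int) : Prop := out = line_to_ints_py_alt line
instance (line : String) (out : Int × Int) : Decidable (Spec_line_to_ints_py line out) := by unfold Spec_line_to_ints_py; infer_instance

-- ===== CLAIM (what is proved, stated in full; the proofs are below) =====
def Claim_equal_line_to_ints_py : Prop := ∀ (line : String), Dom_line_to_ints_py line → Spec_line_to_ints_py line (line_to_ints_py line)

-- ===== LEMMAS AND PROOFS =====

-- LSB-first binary value of a list of chars ('#' = 1).
def pvLsb : List Char → Int
  | [] => 0
  | c :: t => (if c = '#' then 1 else 0) + 2 * pvLsb t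

theorem pvLsb_append (xs ys : List Char) :
    pvLsb (xs ++ ys) = pvLsb xs + 2 ^ xs.length * pvLsb ys := by
  induction xs with
  | nil => simp [pvLsb]
  | cons c t ih => simp [pvLsb, ih, pow_succ]; ring

-- A's loop body, summed from start index s, is 2^s times the LSB-first value.
theorem pvFoldA (l : List Char) (s r : Int) (hs : 0 ≤ s) :
    (PySem.List.enumerate l s).foldl
      (fun r p => if p.2 = '#' then r + 2 ^ p.1.toNat else r) r
    = r + 2 ^ s.toNat * pvLsb l := by
  induction l generalizing s r with
  | nil => simp [PySem.List.enumerate_nil, pvLsb]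
  | cons c t ih =>
    rw [PySem.List.enumerate_cons]
    simp only [List.foldl_cons]
    rw [ih (s + 1) _ (by omega)]
    have h1 : (s + 1).toNat = s.toNat + 1 := by omega
    by_cases hc : c = '#' <;> simp [hc, pvLsb, h1, pow_succ] <;> ring

-- B's fold, fully generalized over the accumulator.
theorem pvFoldB (l : List Char) (a b p : Int) :
    l.foldl (fun (s : Int × Int × Int) ch =>
      let bit : Int := if ch = '#' then 1 else 0
      (s.1 * 2 + bit, s.2.1 + bit * s.2.2, s.2.2 * 2)) (a, b, p)
    = (a * 2 ^ l.length + pvLsb l.reverse, b + p * pvLsb l, p * 2 ^ l.length) := by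
  induction l generalizing a b p with
  | nil => simp [pvLsb]
  | cons c t ih =>
    simp only [List.foldl_cons, ih, List.reverse_cons, pvLsb_append, List.length_cons,
      List.length_reverse, pvLsb]
    refine Prod.ext ?_ (Prod.ext ?_ ?_) <;> by_cases hc : c = '#' <;>
      simp [hc, pow_succ] <;> ring

-- ===== VERDICT (by name: the statement is the Claim_ definition above) =====
theorem line_to_ints_py_spec : Claim_equal_line_to_ints_py := by
  intro line _
  show _ = _
  unfold line_to_ints_py line_to_ints_py_alt
  simp only [pvFoldB]
  rw [pvFoldA _ 0 0 le_rfl, pvFoldA _ 0 0 le_rfl]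
  simp
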